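-- pv_equiv track=rewrite | github.com/Jatin-analyst/AI_Mindmap_app | utils/mindmap_visualizer.py | _calculate_node_levels
-- ===== SOURCE A (Python) =====
-- def _calculate_node_levels(nodes: list) -> dict:
--     """Calculate the level of each node in the hierarchy."""
--     node_levels = {}
--     node_map = {node["id"]: node for node in nodes}
--
--     def get_level(node_id):
--         if node_id in node_levels:
--             return node_levels[node_id]
--
--         node = node_map.get(node_id)
--         if not node or node["parent"] == 0:
--             node_levels[node_id] = 0
--             return 0
--
--         level = get_level(node["parent"]) + 1
--         node_levels[node_id] = level
--         return level
--
--     for node in nodes: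
--         get_level(node["id"])
--
--     return node_levels
-- ===== SOURCE B (Python) =====
-- def _calculate_node_levels(nodes: list) -> dict:
--     """Calculate the level of each node in the hierarchy (iterative ascent)."""
--     node_levels = {}
--     node_map = {node["id"]: node for node in nodes}
--
--     for node in nodes:
--         cur = node["id"]
--         path = []
--         while cur not in node_levels:
--             entry = node_map.get(cur)
--             if not entry or entry["parent"] == 0:
--                 node_levels[cur] = 0
--                 break
--             path.append(cur)
--             cur = entry["parent"]
--         level = node_levels[cur]
--         for nid in reversed(path):
--             level += 1
--             node_levels[nid] = level
--
--     return node_levels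
-- ===== Notes on version B (the rewrite author's own statement) =====
-- stated objective: alternative
-- what changed: Replaces the inner memoised recursive get_level with an iterative ascent: walk up the parent chain collecting the visited ids, record the terminal id at level 0, then assign successive +1 levels back down the collected path, producing the identical dict in the identical insertion order.
import Mathlib
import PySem

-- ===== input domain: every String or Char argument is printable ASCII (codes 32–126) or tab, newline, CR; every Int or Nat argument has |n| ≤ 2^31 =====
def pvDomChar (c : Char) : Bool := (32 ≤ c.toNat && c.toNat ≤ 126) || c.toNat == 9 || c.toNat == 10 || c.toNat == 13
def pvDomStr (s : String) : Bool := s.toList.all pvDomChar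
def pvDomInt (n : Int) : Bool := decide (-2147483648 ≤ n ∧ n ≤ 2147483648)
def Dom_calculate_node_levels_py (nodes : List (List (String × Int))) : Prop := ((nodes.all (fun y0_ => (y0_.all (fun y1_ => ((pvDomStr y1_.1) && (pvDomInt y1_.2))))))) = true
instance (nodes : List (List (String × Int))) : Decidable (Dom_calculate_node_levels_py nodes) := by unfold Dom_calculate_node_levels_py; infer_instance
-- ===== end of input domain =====

-- B replaces A's memoised recursion by an iterative ascent (walk to the root collecting the
-- path, then assign levels back down); same return value, no recursion. Objective: alternative.

-- shared accessors for the node dicts (node["id"], node["parent"], the node_map comprehension)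
def nodeId (n : List (String × Int)) : Int := (PySem.Dict.mk n).getD "id" 0
def nodeParent (n : List (String × Int)) : Int := (PySem.Dict.mk n).getD "parent" 0
def buildMap (nodes : List (List (String × Int))) : PySem.Dict Int (List (String × Int)) :=
  nodes.foldl (fun m n => m.insert (nodeId n) n) PySem.Dict.empty

-- ===== PORT A =====
-- get_level: memoised recursion; fuel (nodes.length+1) only makes it total — under
-- Pre_ every parent chain terminates within that many steps, so fuel is never exhausted.
def getLevelA (m : PySem.Dict Int (List (String × Int))) :
    Nat → PySem.Dict Int Int → Int → Int × PySem.Dict Int Int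
  | 0, levels, _ => (0, levels)
  | f+1, levels, nid =>
    match levels.get? nid with
    | some l => (l, levels)
    | none =>
      match m.get? nid with
      | none => (0, levels.insert nid 0)
      | some node =>
        if node = [] ∨ nodeParent node = 0 then (0, levels.insert nid 0)
        else
          let r := getLevelA m f levels (nodeParent node)
          (r.1 + 1, r.2.insert nid (r.1 + 1))

def calculate_node_levels_py (nodes : List (List (String × Int))) : List (Int × Int) :=
  (nodes.foldl
    (fun levels n => (getLevelA (buildMap nodes) (nodes.length + 1) levels (nodeId n)).2)
    PySem.Dict.empty).items

-- ===== PORT B =====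
-- while-loop ascent: returns (terminal id, visited path, levels with terminal recorded);
-- fuel makes the while loop total, never exhausted under Pre_.
def ascendB (m : PySem.Dict Int (List (String × Int))) :
    Nat → PySem.Dict Int Int → Int → List Int → Int × List Int × PySem.Dict Int Int
  | 0, levels, cur, path => (cur, path, levels)
  | f+1, levels, cur, path =>
    if (levels.get? cur).isSome then (cur, path, levels)
    else
      match m.get? cur with
      | none => (cur, path, levels.insert cur 0)
      | some entry =>
        if entry = [] ∨ nodeParent entry = 0 then (cur, path, levels.insert cur 0)
        else ascendB m f levels (nodeParent entry) (path ++ [cur])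

-- the `for nid in reversed(path)` assignment loop
def settleB : PySem.Dict Int Int → Int → List Int → Int × PySem.Dict Int Int
  | levels, l, [] => (l, levels)
  | levels, l, x :: xs => settleB (levels.insert x (l + 1)) (l + 1) xs

def calculate_node_levels_py_alt (nodes : List (List (String × Int))) : List (Int × Int) :=
  (nodes.foldl (fun levels n =>
      let t := ascendB (buildMap nodes) (nodes.length + 1) levels (nodeId n) []
      (settleB t.2.2 (t.2.2.getD t.1 0) t.2.1.reverse).2)
    PySem.Dict.empty).items

-- ===== PRECONDITION & SPEC =====
-- one step up the parent chain (none = chain ends: id missing from the map, or parent == 0)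
def pStep (m : PySem.Dict Int (List (String × Int))) (k : Int) : Option Int :=
  match m.get? k with
  | none => none
  | some node => if node = [] ∨ nodeParent node = 0 then none else some (nodeParent node)

-- Pre_: exactly where Python A returns normally — every node has an "id" key, every node
-- stored in node_map has a "parent" key (otherwise KeyError), and every parent chain reaches
-- a root (a missing id or parent 0) within nodes.length steps, i.e. the parent graph is
-- acyclic (on a cycle A recurses forever / RecursionError).
def Pre_calculate_node_levels_py (nodes : List (List (String × Int))) : Prop :=
  (∀ n ∈ nodes, (PySem.Dict.mk n).contains "id" = true) ∧
  (∀ v ∈ (buildMap nodes).values, (PySem.Dict.mk v).contains "parent" = true) ∧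
  (∀ n ∈ nodes,
    (fun o => o.bind (pStep (buildMap nodes)))^[nodes.length]
      (pStep (buildMap nodes) (nodeId n)) = none)
instance (nodes : List (List (String × Int))) : Decidable (Pre_calculate_node_levels_py nodes) := by
  unfold Pre_calculate_node_levels_py; infer_instance

def pvWitness_calculate_node_levels_py : (List (List (String × Int))) :=
  [[("id", 1), ("parent", 0)], [("id", 2), ("parent", 1)], [("id", 3), ("parent", 2)]]

def Spec_calculate_node_levels_py (nodes : List (List (String × Int))) (out : List (Int × Int)) : Prop := out = calculate_node_levels_py_alt nodes
instance (nodes : List (List (String × Int))) (out : List (Int × Int)) : Decidable (Spec_calculate_node_levels_py nodes out) := by unfold Spec_calculate_node_levels_py; infer_instance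

-- ===== CLAIM (what is proved, stated in full; the proofs are below) =====
def Claim_equal_calculate_node_levels_py : Prop := ∀ (nodes : List (List (String × Int))), Dom_calculate_node_levels_py nodes → Pre_calculate_node_levels_py nodes → Spec_calculate_node_levels_py nodes (calculate_node_levels_py nodes)

-- ===== LEMMAS AND PROOFS =====

-- chain from k terminates within f steps (proof-internal termination measure)
def chainTerm (m : PySem.Dict Int (List (String × Int))) : Int → Nat → Bool
  | _, 0 => false
  | k, f+1 =>
    match pStep m k with
    | none => true
    | some p => chainTerm m p f

lemma chainTerm_of_iterate (m : PySem.Dict Int (List (String × Int))) :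
    ∀ (f : Nat) (k : Int),
      (fun o => o.bind (pStep m))^[f] (pStep m k) = none → chainTerm m k (f + 1) = true := by
  intro f
  induction f with
  | zero =>
    intro k h
    simp only [Function.iterate_zero, id] at h
    simp [chainTerm, h]
  | succ f ih =>
    intro k h
    cases hp : pStep m k with
    | none => simp [chainTerm, hp]
    | some p =>
      rw [Function.iterate_succ_apply, hp] at h
      simp only [Option.bind_some] at h
      simp only [chainTerm, hp]
      exact ih p h

-- non-accumulator form of the ascent
def ascendNA (m : PySem.Dict Int (List (String × Int))) :
    Nat → PySem.Dict Int Int → Int → Int × List Int × PySem.Dict Int Int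
  | 0, levels, cur => (cur, [], levels)
  | f+1, levels, cur =>
    if (levels.get? cur).isSome then (cur, [], levels)
    else
      match m.get? cur with
      | none => (cur, [], levels.insert cur 0)
      | some entry =>
        if entry = [] ∨ nodeParent entry = 0 then (cur, [], levels.insert cur 0)
        else
          let t := ascendNA m f levels (nodeParent entry)
          (t.1, cur :: t.2.1, t.2.2)

lemma ascendB_eq_NA (m : PySem.Dict Int (List (String × Int))) :
    ∀ (f : Nat) (levels : PySem.Dict Int Int) (cur : Int) (path : List Int),
      ascendB m f levels cur path =
        ((ascendNA m f levels cur).1, path ++ (ascendNA m f levels cur).2.1,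
          (ascendNA m f levels cur).2.2) := by
  intro f
  induction f with
  | zero => intro levels cur path; simp [ascendB, ascendNA]
  | succ f ih =>
    intro levels cur path
    simp only [ascendB, ascendNA]
    by_cases h1 : (levels.get? cur).isSome
    · simp [h1]
    · simp only [h1]
      cases hm : m.get? cur with
      | none => simp
      | some entry =>
        by_cases h2 : entry = [] ∨ nodeParent entry = 0
        · simp [h2]
        · simp [h2, ih]

lemma settleB_append (x : Int) :
    ∀ (xs : List Int) (L : PySem.Dict Int Int) (l : Int),
      settleB L l (xs ++ [x]) =
        ((settleB L l xs).1 + 1, (settleB L l xs).2.insert x ((settleB L l xs).1 + 1)) := by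
  intro xs
  induction xs with
  | nil => intro L l; simp [settleB]
  | cons y ys ih => intro L l; simp [settleB, ih]

-- the heart: A's memoised recursion = B's ascent followed by the assignment loop
lemma getLevelA_eq_ascend (m : PySem.Dict Int (List (String × Int))) :
    ∀ (f : Nat) (levels : PySem.Dict Int Int) (cur : Int),
      chainTerm m cur f = true →
      getLevelA m f levels cur =
        settleB (ascendNA m f levels cur).2.2
          ((ascendNA m f levels cur).2.2.getD (ascendNA m f levels cur).1 0)
          (ascendNA m f levels cur).2.1.reverse := by
  intro f
  induction f with
  | zero => intro levels cur h; simp [chainTerm] at h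
  | succ f ih =>
    intro levels cur h
    simp only [getLevelA, ascendNA]
    cases hl : levels.get? cur with
    | some l =>
      simp [settleB, PySem.Dict.getD_eq_get?_getD, hl]
    | none =>
      simp only [Option.isSome_none, Bool.false_eq_true, if_false]
      cases hm : m.get? cur with
      | none =>
        simp [settleB, PySem.Dict.getD_insert_self]
      | some entry =>
        by_cases h2 : entry = [] ∨ nodeParent entry = 0
        · simp [h2, settleB, PySem.Dict.getD_insert_self]
        · have hstep : pStep m cur = some (nodeParent entry) := by
            simp [pStep, hm, h2]
          have hct : chainTerm m (nodeParent entry) f = true := by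
            rw [chainTerm, hstep] at h; exact h
          have hih := ih levels (nodeParent entry) hct
          simp only [h2, if_false]
          rw [List.reverse_cons, settleB_append]
          rw [hih]

-- fold the per-node equality through the outer loop
lemma fold_eq (m : PySem.Dict Int (List (String × Int))) (F : Nat) :
    ∀ (l : List (List (String × Int))) (levels : PySem.Dict Int Int),
      (∀ n ∈ l, chainTerm m (nodeId n) F = true) →
      l.foldl (fun levels n => (getLevelA m F levels (nodeId n)).2) levels =
      l.foldl (fun levels n =>
        let t := ascendB m F levels (nodeId n) []
        (settleB t.2.2 (t.2.2.getD t.1 0) t.2.1.reverse).2) levels := by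
  intro l
  induction l with
  | nil => intro levels _; rfl
  | cons n ns ih =>
    intro levels hall
    have h1 := getLevelA_eq_ascend m F levels (nodeId n) (hall n (by simp))
    simp only [List.foldl_cons]
    rw [ih _ (fun x hx => hall x (by simp [hx]))]
    congr 1
    rw [ascendB_eq_NA]
    simp only [List.nil_append]
    rw [← h1]

-- ===== VERDICT (by name: the statement is the Claim_ definition above) =====
theorem calculate_node_levels_py_spec : Claim_equal_calculate_node_levels_py := by
  intro nodes _ hPre
  obtain ⟨-, -, hterm⟩ := hPre
  unfold Spec_calculate_node_levels_py calculate_node_levels_py calculate_node_levels_py_alt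
  have := fold_eq (buildMap nodes) (nodes.length + 1) nodes PySem.Dict.empty
    (fun n hn => chainTerm_of_iterate (buildMap nodes) nodes.length (nodeId n) (hterm n hn))
  rw [this]
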